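-- pv_equiv track=rewrite | github.com/KamorionLabs/dashborion | cli/dashborion/generators/diagram_utils.py | format_hosts_for_display
-- ===== SOURCE A (Python) =====
-- def format_hosts_for_display(hosts, max_per_line=2, make_link=False):
--     """
--     Formate une liste de hosts pour l'affichage.
--
--     Args:
--         hosts (list): Liste de tuples (host, path)
--         max_per_line (int): Nombre maximum de hosts par ligne
--         make_link (bool): Si True, génère des liens HTML pour les hosts
--
--     Returns:
--         str: Hosts formatés pour l'affichage
--     """
--     formatted_hosts = []
--     current_line = []
--
--     for host, path in sorted(hosts, key=lambda x: x[0]):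
--         if make_link:
--             # Génère un lien HTTPS pour le host
--             host_str = f'<a href="https://{host}{path}" target="_blank">{host}{path}</a>'
--         else:
--             host_str = f"{host}{path}"
--
--         current_line.append(host_str)
--
--         if len(current_line) >= max_per_line:
--             formatted_hosts.append(", ".join(current_line))
--             current_line = []
--
--     if current_line:
--         formatted_hosts.append(", ".join(current_line))
--
--     return "\n".join(formatted_hosts)
-- ===== SOURCE B (Python) =====
-- def format_hosts_for_display(hosts, max_per_line=2, make_link=False):
--     strings = [
--         f'<a href="https://{host}{path}" target="_blank">{host}{path}</a>' if make_link
--         else f"{host}{path}"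
--         for host, path in sorted(hosts, key=lambda x: x[0])
--     ]
--     step = max(max_per_line, 1)
--     return "\n".join(", ".join(strings[i:i + step]) for i in range(0, len(strings), step))
-- ===== Notes on version B (the rewrite author's own statement) =====
-- stated objective: simpler
-- what changed: Replaces A's running current_line accumulator with flush-inside-the-loop by a single comprehension that formats the sorted hosts, followed by index-slice chunking with step = max(max_per_line, 1), which reproduces A's one-host-per-line behaviour for non-positive max_per_line.
import Mathlib
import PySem

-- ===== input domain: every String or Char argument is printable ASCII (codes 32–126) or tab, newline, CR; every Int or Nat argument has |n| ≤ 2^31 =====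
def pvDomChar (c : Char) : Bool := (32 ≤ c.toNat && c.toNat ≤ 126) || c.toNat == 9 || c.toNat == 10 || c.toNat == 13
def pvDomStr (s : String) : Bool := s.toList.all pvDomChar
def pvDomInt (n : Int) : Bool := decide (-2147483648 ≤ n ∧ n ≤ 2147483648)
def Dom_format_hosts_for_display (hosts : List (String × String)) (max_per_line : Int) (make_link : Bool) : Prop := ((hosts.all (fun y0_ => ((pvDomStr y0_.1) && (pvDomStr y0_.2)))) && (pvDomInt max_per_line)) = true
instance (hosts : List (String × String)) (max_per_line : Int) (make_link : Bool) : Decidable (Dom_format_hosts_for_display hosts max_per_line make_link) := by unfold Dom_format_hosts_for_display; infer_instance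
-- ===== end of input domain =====

-- B replaces A's running current_line accumulator/flush loop by a map pass over the
-- sorted hosts followed by index-free chunking with step = max(max_per_line, 1)
-- (objective: simpler decomposition; same cost).


-- ===== PORT A =====
-- the f-string for one host (identical text in both Pythons)
def fhdFmt (make_link : Bool) (hp : String × String) : String :=
  if make_link then
    "<a href=\"https://" ++ hp.1 ++ hp.2 ++ "\" target=\"_blank\">" ++ hp.1 ++ hp.2 ++ "</a>"
  else hp.1 ++ hp.2

-- A's loop: state (formatted_hosts, current_line); the trailing `if current_line:` flush
-- is the base case.
def fhdLoop (max_per_line : Int) (make_link : Bool) :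
    List (String × String) → List String → List String → List String
  | [], acc, cur => if cur = [] then acc else acc ++ [PySem.Str.join ", " cur]
  | hp :: rest, acc, cur =>
    let cur' := cur ++ [fhdFmt make_link hp]
    if max_per_line ≤ (cur'.length : Int) then
      fhdLoop max_per_line make_link rest (acc ++ [PySem.Str.join ", " cur']) []
    else
      fhdLoop max_per_line make_link rest acc cur'

def format_hosts_for_display (hosts : List (String × String)) (max_per_line : Int) (make_link : Bool) : String :=
  PySem.Str.join "\n" (fhdLoop max_per_line make_link (PySem.List.sorted hosts (fun x => x.1) false) [] [])

-- ===== PORT B =====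
-- B's slice chunking `[", ".join(strings[i:i+step]) for i in range(0, len, step)]`
def fhdChunk (step : Nat) : List String → List String
  | [] => []
  | x :: xs => PySem.Str.join ", " ((x :: xs).take step) :: fhdChunk step (xs.drop (step - 1))
termination_by l => l.length
decreasing_by simp

def format_hosts_for_display_alt (hosts : List (String × String)) (max_per_line : Int) (make_link : Bool) : String :=
  let strings := (PySem.List.sorted hosts (fun x => x.1) false).map (fhdFmt make_link)
  let step := (max max_per_line 1).toNat
  PySem.Str.join "\n" (fhdChunk step strings)

-- ===== PRECONDITION & SPEC =====
def Spec_format_hosts_for_display (hosts : List (String × String)) (max_per_line : Int) (make_link : Bool) (out : String) : Prop := out = format_hosts_for_display_alt hosts max_per_line make_link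
instance (hosts : List (String × String)) (max_per_line : Int) (make_link : Bool) (out : String) : Decidable (Spec_format_hosts_for_display hosts max_per_line make_link out) := by unfold Spec_format_hosts_for_display; infer_instance

-- ===== CLAIM (what is proved, stated in full; the proofs are below) =====
def Claim_equal_format_hosts_for_display : Prop := ∀ (hosts : List (String × String)) (max_per_line : Int) (make_link : Bool), Dom_format_hosts_for_display hosts max_per_line make_link → Spec_format_hosts_for_display hosts max_per_line make_link (format_hosts_for_display hosts max_per_line make_link)

-- ===== LEMMAS AND PROOFS =====
lemma fhdChunk_cons (step : Nat) (hs : 1 ≤ step) (x : String) (xs : List String) :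
    fhdChunk step (x :: xs) =
      PySem.Str.join ", " ((x :: xs).take step) :: fhdChunk step ((x :: xs).drop step) := by
  rw [fhdChunk]
  congr 1
  cases step with
  | zero => omega
  | succ s => simp

lemma fhdChunk_append (step : Nat) (l t : List String) (hl : l.length = step)
    (hs : 1 ≤ step) :
    fhdChunk step (l ++ t) = PySem.Str.join ", " l :: fhdChunk step t := by
  rcases l with _ | ⟨x, xs⟩
  · simp at hl; omega
  · rw [List.cons_append, fhdChunk_cons step hs,
      ← List.cons_append, List.take_left' hl, List.drop_left' hl]

-- loop invariant: with current_line = cur (shorter than the flush length), A's loop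
-- produces acc ++ the chunking of cur followed by the formatted remaining hosts.
lemma fhdLoop_eq_chunk (mpl : Int) (mk : Bool) (step : Nat)
    (hstep : (step : Int) = max mpl 1) :
    ∀ (ps : List (String × String)) (acc cur : List String), cur.length < step →
      fhdLoop mpl mk ps acc cur = acc ++ fhdChunk step (cur ++ ps.map (fhdFmt mk)) := by
  have hs1 : 1 ≤ step := by omega
  intro ps
  induction ps with
  | nil =>
    intro acc cur hcur
    rcases cur with _ | ⟨c, cs⟩
    · simp [fhdLoop, fhdChunk]
    · rw [fhdLoop]
      simp only [List.map_nil, List.append_nil]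
      rw [fhdChunk]
      have h1 : (c :: cs).take step = c :: cs :=
        List.take_of_length_le (by simpa using Nat.le_of_lt hcur)
      have h2 : cs.drop (step - 1) = [] := by
        apply List.drop_eq_nil_of_le
        simp at hcur; omega
      simp [h1, h2, fhdChunk]
  | cons hp rest ih =>
    intro acc cur hcur
    rw [fhdLoop]
    have hcond : (mpl ≤ ((cur ++ [fhdFmt mk hp]).length : Int)) ↔
        (cur ++ [fhdFmt mk hp]).length = step := by
      simp only [List.length_append, List.length_cons, List.length_nil]
      omega
    by_cases h : mpl ≤ ((cur ++ [fhdFmt mk hp]).length : Int)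
    · rw [if_pos h]
      have hlen : (cur ++ [fhdFmt mk hp]).length = step := hcond.mp h
      rw [ih (acc ++ [PySem.Str.join ", " (cur ++ [fhdFmt mk hp])]) []
        (by simp only [List.length_nil]; omega)]
      have hsplit : cur ++ fhdFmt mk hp :: rest.map (fhdFmt mk) =
          (cur ++ [fhdFmt mk hp]) ++ rest.map (fhdFmt mk) := by simp
      rw [List.map_cons, hsplit, fhdChunk_append step _ _ hlen hs1]
      simp
    · rw [if_neg h]
      have hlt : (cur ++ [fhdFmt mk hp]).length < step := by
        rcases Nat.lt_or_ge (cur ++ [fhdFmt mk hp]).length step with h' | h'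
        · exact h'
        · exact absurd (hcond.mpr (by omega)) h
      rw [ih acc (cur ++ [fhdFmt mk hp]) hlt]
      simp

-- ===== VERDICT (by name: the statement is the Claim_ definition above) =====
theorem format_hosts_for_display_spec : Claim_equal_format_hosts_for_display := by
  intro hosts mpl mk _
  unfold Spec_format_hosts_for_display format_hosts_for_display format_hosts_for_display_alt
  have hstep : (((max mpl 1).toNat : Int)) = max mpl 1 := by omega
  rw [fhdLoop_eq_chunk mpl mk (max mpl 1).toNat hstep _ [] [] (by simp only [List.length_nil]; omega)]
  simp
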